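-- pv_equiv track=rewrite | github.com/loning/mbook-binary | src/binaryuniverse/tests/test_C17_5.py | _get_two_fibonacci_predecessors
-- ===== SOURCE A (Python) =====
-- from typing import List, Tuple, Optional, Set
--
-- def _get_two_fibonacci_predecessors(n: int) -> Tuple[int, int]:
--     """找到n的两个最近Fibonacci前驱"""
--     if n <= 2:
--         return 0, 1
--
--     fibs = [1, 2]
--     while fibs[-1] < n:
--         fibs.append(fibs[-1] + fibs[-2])
--
--     # 找到小于n的最大两个Fibonacci数
--     predecessors = [f for f in fibs if f < n]
--     if len(predecessors) >= 2:
--         return predecessors[-2], predecessors[-1]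
--     elif len(predecessors) == 1:
--         return 0, predecessors[0]
--     else:
--         return 0, 1
-- ===== SOURCE B (Python) =====
-- # Binary search over a fixed precomputed Fibonacci table (covers all n with
-- # |n| <= 2**31); no Fibonacci numbers are generated at call time.
-- _FIBS = (1, 2, 3, 5, 8, 13, 21, 34, 55, 89, 144, 233, 377, 610, 987, 1597,
--          2584, 4181, 6765, 10946, 17711, 28657, 46368, 75025, 121393, 196418,
--          317811, 514229, 832040, 1346269, 2178309, 3524578, 5702887, 9227465,
--          14930352, 24157817, 39088169, 63245986, 102334155, 165580141,
--          267914296, 433494437, 701408733, 1134903170, 1836311903, 2971215073)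
--
--
-- def _get_two_fibonacci_predecessors(n: int) -> "Tuple[int, int]":
--     """Binary-search the constant table for the first entry >= n; the two
--     entries before that position are the answer."""
--     if n <= 2:
--         return 0, 1
--     lo, hi = 0, len(_FIBS)
--     while lo < hi:
--         mid = (lo + hi) // 2
--         if _FIBS[mid] < n:
--             lo = mid + 1
--         else:
--             hi = mid
--     return _FIBS[lo - 2], _FIBS[lo - 1]
-- ===== Notes on version B (the rewrite author's own statement) =====
-- stated objective: alternative
-- what changed: B does no Fibonacci arithmetic at call time: it binary-searches a precomputed constant table of all Fibonacci numbers covering the whole input domain, instead of A's generate-the-sequence-then-filter-and-index two-phase loop.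
import Mathlib
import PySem

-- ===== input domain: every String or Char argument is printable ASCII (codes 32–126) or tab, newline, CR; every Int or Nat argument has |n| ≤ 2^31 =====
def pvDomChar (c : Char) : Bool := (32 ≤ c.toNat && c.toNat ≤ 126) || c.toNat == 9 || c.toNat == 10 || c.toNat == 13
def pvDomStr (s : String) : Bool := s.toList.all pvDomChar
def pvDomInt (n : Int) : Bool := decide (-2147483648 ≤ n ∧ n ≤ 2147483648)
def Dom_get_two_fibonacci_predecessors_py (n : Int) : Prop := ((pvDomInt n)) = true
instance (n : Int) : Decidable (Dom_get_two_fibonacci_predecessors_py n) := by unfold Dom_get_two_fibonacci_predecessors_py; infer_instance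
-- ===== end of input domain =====

-- B replaces A's runtime Fibonacci generation + filter with a binary search over
-- a precomputed constant table covering the whole input domain (objective: alternative).

-- ===== PORT A =====
-- A's while-loop appending to `fibs`; the list is kept REVERSED (append-at-end =
-- cons), so fibs[-1] is `b` and fibs[-2] is `a`.  The 1 ≤ a ≤ b hypotheses only
-- justify termination (they hold at the single call site with a = 1, b = 2).
def pvFibLoopA (n : Int) (a b : Int) (rest : List Int)
    (ha : 1 ≤ a) (hab : a ≤ b) : List Int :=
  if b < n then
    pvFibLoopA n b (a + b) (a :: rest) (le_trans ha hab) (by omega)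
  else
    b :: a :: rest
termination_by (n - b).toNat
decreasing_by omega

def get_two_fibonacci_predecessors_py (n : Int) : Int × Int :=
  if n ≤ 2 then (0, 1)
  else
    let fibs : List Int := (pvFibLoopA n 1 2 [] (by norm_num) (by norm_num)).reverse
    let predecessors := fibs.filter (fun f => decide (f < n))
    if 2 ≤ predecessors.length then
      ((PySem.List.pyGet? predecessors (-2)).getD 0,
       (PySem.List.pyGet? predecessors (-1)).getD 0)
    else if predecessors.length = 1 then
      (0, (PySem.List.pyGet? predecessors 0).getD 0)
    else (0, 1)

-- ===== PORT B =====
-- B's constant table _FIBS (every Fibonacci number of the scheme 1,2,3,5,… up to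
-- the first one exceeding 2^31).
def pvFibsTable : List Int :=
  [1, 2, 3, 5, 8, 13, 21, 34, 55, 89, 144, 233, 377, 610, 987, 1597,
   2584, 4181, 6765, 10946, 17711, 28657, 46368, 75025, 121393, 196418,
   317811, 514229, 832040, 1346269, 2178309, 3524578, 5702887, 9227465,
   14930352, 24157817, 39088169, 63245986, 102334155, 165580141,
   267914296, 433494437, 701408733, 1134903170, 1836311903, 2971215073]

-- B's hand-written `while lo < hi` binary-search loop (indices are nonnegative
-- throughout in the Python, so Nat carries them faithfully; `(lo+hi)//2` = Nat `/`).
def pvBisect (n : Int) (lo hi : Nat) : Nat :=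
  if h : lo < hi then
    if pvFibsTable.getD ((lo + hi) / 2) 0 < n then pvBisect n ((lo + hi) / 2 + 1) hi
    else pvBisect n lo ((lo + hi) / 2)
  else lo
termination_by hi - lo
decreasing_by all_goals omega

def get_two_fibonacci_predecessors_py_alt (n : Int) : Int × Int :=
  if n ≤ 2 then (0, 1)
  else
    let lo := pvBisect n 0 46
    (pvFibsTable.getD (lo - 2) 0, pvFibsTable.getD (lo - 1) 0)

-- ===== PRECONDITION & SPEC =====
def Spec_get_two_fibonacci_predecessors_py (n : Int) (out : Int × Int) : Prop := out = get_two_fibonacci_predecessors_py_alt n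
instance (n : Int) (out : Int × Int) : Decidable (Spec_get_two_fibonacci_predecessors_py n out) := by unfold Spec_get_two_fibonacci_predecessors_py; infer_instance

-- ===== CLAIM (what is proved, stated in full; the proofs are below) =====
def Claim_equal_get_two_fibonacci_predecessors_py : Prop := ∀ (n : Int), Dom_get_two_fibonacci_predecessors_py n → Spec_get_two_fibonacci_predecessors_py n (get_two_fibonacci_predecessors_py n)

-- ===== LEMMAS AND PROOFS =====

-- facts about the constant table, checked by evaluation
theorem pvF_mono : ∀ k, k < 46 → ∀ m, m < 46 → k ≤ m →
    pvFibsTable.getD k 0 ≤ pvFibsTable.getD m 0 := by decide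

theorem pvF_rec : ∀ i, i < 44 →
    pvFibsTable.getD i 0 + pvFibsTable.getD (i + 1) 0 = pvFibsTable.getD (i + 2) 0 := by
  decide

theorem pvF_top : pvFibsTable.getD 45 0 = 2971215073 := by decide

-- A's loop, started at table position i, stops with the overshoot F[j+1] on top of
-- the two answers F[j], F[j-1]; everything under them is < n.
theorem pvLoopA_table (n : Int) (hn : n ≤ 2147483648) (a b : Int) (rest : List Int)
    (ha : 1 ≤ a) (hab : a ≤ b) :
    ∀ i : Nat, i + 1 ≤ 45 → a = pvFibsTable.getD i 0 → b = pvFibsTable.getD (i+1) 0 →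
    b < n → a = pvFibsTable.getD (i+1-1) 0 → (∀ x ∈ rest, x < n) →
    ∃ j tail, 1 ≤ j ∧ j ≤ 44 ∧ pvFibsTable.getD j 0 < n ∧ n ≤ pvFibsTable.getD (j+1) 0 ∧
      pvFibsTable.getD (j-1) 0 < n ∧
      pvFibLoopA n a b rest ha hab
        = pvFibsTable.getD (j+1) 0 :: pvFibsTable.getD j 0 :: pvFibsTable.getD (j-1) 0 :: tail ∧
      (∀ x ∈ tail, x < n) := by
  induction a, b, rest, ha, hab using pvFibLoopA.induct n with
  | case1 a b rest ha hab h ih =>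
    intro i hi45 hA hB hBn _ hrest
    have hi44 : i + 1 ≤ 44 := by
      rcases Nat.lt_or_ge (i+1) 45 with h' | h'
      · omega
      · exfalso; have : i + 1 = 45 := by omega
        rw [this] at hB; rw [pvF_top] at hB; omega
    have hsum : a + b = pvFibsTable.getD (i+2) 0 := by
      rw [hA, hB]; exact pvF_rec i (by omega)
    rw [pvFibLoopA, if_pos h]
    by_cases hs : a + b < n
    · obtain ⟨j, tail, h1, h2, h3, h4, h5, h6, h7⟩ :=
        ih (i+1) (by omega) hB hsum hs (by simpa using hB)
          (by intro x hx
              rcases List.mem_cons.mp hx with hx | hx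
              · subst hx; omega
              · exact hrest x hx)
      exact ⟨j, tail, h1, h2, h3, h4, h5, h6, h7⟩
    · rw [pvFibLoopA, if_neg hs]
      have han : a < n := by omega
      refine ⟨i + 1, rest, by omega, by omega, hB ▸ hBn, ?_, ?_, ?_, hrest⟩
      · rw [show i + 1 + 1 = i + 2 from rfl, ← hsum]; omega
      · rw [show i + 1 - 1 = i from rfl, ← hA]; exact han
      · rw [show i + 1 + 1 = i + 2 from rfl, ← hsum,
            show i + 1 - 1 = i from rfl, ← hA, ← hB]
  | case2 a b rest ha hab h =>
    intro i _ _ _ hBn _ _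
    omega

-- the binary-search invariant: everything strictly left of the result is < n,
-- everything from the result on is ≥ n (phrased through the boundary entries)
theorem pvBisect_spec (n : Int) : ∀ lo hi : Nat, lo ≤ hi → hi ≤ 46 →
    (lo = 0 ∨ pvFibsTable.getD (lo - 1) 0 < n) →
    (hi = 46 ∨ n ≤ pvFibsTable.getD hi 0) →
    lo ≤ pvBisect n lo hi ∧ pvBisect n lo hi ≤ hi ∧
    (pvBisect n lo hi = 0 ∨ pvFibsTable.getD (pvBisect n lo hi - 1) 0 < n) ∧
    (pvBisect n lo hi = 46 ∨ n ≤ pvFibsTable.getD (pvBisect n lo hi) 0) := by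
  intro lo hi
  induction lo, hi using pvBisect.induct n with
  | case1 lo hi h hlt ih =>
    intro _ h46 hL hH
    rw [pvBisect, dif_pos h, if_pos hlt]
    have := ih (by omega) h46 (Or.inr (by simpa using hlt)) hH
    omega
  | case2 lo hi h hge ih =>
    intro _ h46 hL hH
    rw [pvBisect, dif_pos h, if_neg hge]
    have := ih (by omega) (by omega) hL (Or.inr (by omega))
    omega
  | case3 lo hi h =>
    intro hle h46 hL hH
    have hlohi : lo = hi := by omega
    subst hlohi
    rw [pvBisect, dif_neg h]
    exact ⟨le_refl _, le_refl _, hL, hH⟩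

theorem pyGet?_snoc2_neg_one (l : List Int) (p q : Int) :
    PySem.List.pyGet? (l ++ [p, q]) (-1) = some q := by
  rw [show l ++ [p, q] = (l ++ [p]) ++ [q] by simp]
  exact PySem.List.pyGet?_neg_one_append_singleton _ _

theorem pyGet?_snoc2_neg_two (l : List Int) (p q : Int) :
    PySem.List.pyGet? (l ++ [p, q]) (-2) = some p := by
  rw [PySem.List.pyGet?_neg_ofNat _ 2 (by omega) (by simp)]
  simp

-- ===== VERDICT (by name: the statement is the Claim_ definition above) =====
theorem get_two_fibonacci_predecessors_py_spec : Claim_equal_get_two_fibonacci_predecessors_py := by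
  intro n hdom
  have hn : n ≤ 2147483648 := by
    unfold Dom_get_two_fibonacci_predecessors_py pvDomInt at hdom
    simpa using (of_decide_eq_true hdom).2
  unfold Spec_get_two_fibonacci_predecessors_py
  unfold get_two_fibonacci_predecessors_py get_two_fibonacci_predecessors_py_alt
  by_cases hn2 : n ≤ 2
  · simp [hn2]
  · simp only [if_neg hn2]
    -- characterise A
    obtain ⟨j, tail, hj1, hj44, hjlt, hjge, hjm1, heq, htail⟩ :=
      pvLoopA_table n hn 1 2 [] (by norm_num) (by norm_num) 0 (by omega)
        (by decide) (by decide) (by omega) (by decide) (by intro x hx; simp at hx)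
    rw [heq]
    set A1 := pvFibsTable.getD (j-1) 0 with hA1
    set A2 := pvFibsTable.getD j 0 with hA2
    set A3 := pvFibsTable.getD (j+1) 0 with hA3
    have hfilter : ((A3 :: A2 :: A1 :: tail).reverse.filter (fun f => decide (f < n)))
          = tail.reverse ++ [A1, A2] := by
      have htailf : tail.reverse.filter (fun f => decide (f < n)) = tail.reverse := by
        apply List.filter_eq_self.mpr
        intro x hx
        simp only [decide_eq_true_eq]
        exact htail x (List.mem_reverse.mp hx)
      simp [List.filter_append, htailf, hjlt, hjm1, not_lt.mpr hjge]
    rw [hfilter]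
    have hlen : 2 ≤ (tail.reverse ++ [A1, A2]).length := by simp
    rw [if_pos hlen, pyGet?_snoc2_neg_one, pyGet?_snoc2_neg_two]
    -- characterise B
    obtain ⟨hr0, hr46, hrL, hrH⟩ :=
      pvBisect_spec n 0 46 (by omega) (by omega) (Or.inl rfl) (Or.inl rfl)
    set r := pvBisect n 0 46 with hrdef
    have hrne : r ≠ 46 := by
      intro hr
      rcases hrL with h0 | hlt
      · omega
      · rw [hr] at hlt; rw [pvF_top] at hlt; omega
    have hrge : n ≤ pvFibsTable.getD r 0 := by
      rcases hrH with h | h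
      · exact absurd h hrne
      · exact h
    have hrj : r = j + 1 := by
      by_contra hne
      rcases Nat.lt_or_ge r (j+1) with hlt | hgt
      · have : pvFibsTable.getD r 0 ≤ pvFibsTable.getD j 0 :=
          pvF_mono r (by omega) j (by omega) (by omega)
        omega
      · have hr2 : j + 2 ≤ r := by omega
        rcases hrL with h0 | hlt
        · omega
        · have : pvFibsTable.getD (j+1) 0 ≤ pvFibsTable.getD (r-1) 0 :=
            pvF_mono (j+1) (by omega) (r-1) (by omega) (by omega)
          omega
    rw [hrj, show j + 1 - 2 = j - 1 from by omega, show j + 1 - 1 = j from by omega,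
        ← hA1, ← hA2]
    rfl
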